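-- pv_equiv track=rewrite | github.com/JanaEsther/Python | prevod_cislic.py | arabske_na_rimske
-- ===== SOURCE A (Python) =====
-- def arabske_na_rimske(ar):
--     I = 1
--     V = 5
--     rest = ar - V
--     if ar > 5:
--         return "V" + arabske_na_rimske(rest)
--     if ar == 3 * 1 :
--         return "III"
--     if ar ==  2 * 1 :
--         return  "II"
--     if ar == 1 *1:
--         return "I"
--     if ar == 5:
--         return "V"
-- ===== SOURCE B (Python) =====
-- def arabske_na_rimske(ar):
--     count = 0
--     while ar > 5:
--         count += 1
--         ar -= 5
--     base = {1: "I", 2: "II", 3: "III", 5: "V"}.get(ar)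
--     if count == 0:
--         return base
--     return "V" * count + base
-- ===== Notes on version B (the rewrite author's own statement) =====
-- stated objective: alternative
-- what changed: Replaces A's recursion (prefix 'V' per recursive call, then an if-chain) with an explicit counting loop that subtracts 5s, a dict lookup for the remainder, and a single 'V'*count prefix.
import Mathlib
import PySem

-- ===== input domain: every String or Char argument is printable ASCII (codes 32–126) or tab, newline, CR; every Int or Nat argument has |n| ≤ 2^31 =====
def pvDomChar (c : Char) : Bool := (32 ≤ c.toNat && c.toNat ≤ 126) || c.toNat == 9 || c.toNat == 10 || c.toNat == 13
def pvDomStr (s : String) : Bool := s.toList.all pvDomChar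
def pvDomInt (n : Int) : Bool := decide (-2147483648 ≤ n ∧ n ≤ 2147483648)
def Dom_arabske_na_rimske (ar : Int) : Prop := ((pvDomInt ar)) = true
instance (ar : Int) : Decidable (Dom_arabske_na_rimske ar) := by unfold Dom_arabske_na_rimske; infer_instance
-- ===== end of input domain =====

-- B replaces A's recursion with an explicit count-subtract loop plus a dict lookup (alternative decomposition, same cost).

-- ===== PORT A =====
def arabske_na_rimske (ar : Int) : Option String :=
  let _I : Int := 1
  let V : Int := 5
  let rest := ar - V
  if ar > 5 then
    -- "V" + recursive result: Python raises TypeError when the recursive call returns None (excluded by Pre_)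
    (arabske_na_rimske rest).map (fun s => "V" ++ s)
  else if ar = 3 * 1 then some "III"
  else if ar = 2 * 1 then some "II"
  else if ar = 1 * 1 then some "I"
  else if ar = 5 then some "V"
  else none
termination_by ar.toNat
decreasing_by omega

-- ===== PORT B =====
-- while ar > 5: count += 1; ar -= 5
def pvVLoop (count : Nat) (ar : Int) : Nat × Int :=
  if ar > 5 then pvVLoop (count + 1) (ar - 5) else (count, ar)
termination_by ar.toNat
decreasing_by omega

def arabske_na_rimske_alt (ar : Int) : Option String :=
  let p := pvVLoop 0 ar
  let base := (PySem.Dict.ofList [((1 : Int), "I"), (2, "II"), (3, "III"), (5, "V")]).get? p.2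
  if p.1 = 0 then base
  -- "V" * count + base: raises TypeError when base is None (excluded by Pre_)
  else base.map (fun b => String.ofList (List.replicate p.1 'V') ++ b)

-- ===== PRECONDITION & SPEC =====
-- Pre_ excludes exactly the inputs on which the Python A raises TypeError ("V" + None): ar > 5 with ar ≡ 4 (mod 5).
def Pre_arabske_na_rimske (ar : Int) : Prop := ¬ (ar > 5 ∧ ar % 5 = 4)
instance (ar : Int) : Decidable (Pre_arabske_na_rimske ar) := by unfold Pre_arabske_na_rimske; infer_instance
def pvWitness_arabske_na_rimske : Int := 17

def Spec_arabske_na_rimske (ar : Int) (out : Option String) : Prop := out = arabske_na_rimske_alt ar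
instance (ar : Int) (out : Option String) : Decidable (Spec_arabske_na_rimske ar out) := by unfold Spec_arabske_na_rimske; infer_instance

-- ===== CLAIM (what is proved, stated in full; the proofs are below) =====
def Claim_equal_arabske_na_rimske : Prop := ∀ (ar : Int), Dom_arabske_na_rimske ar → Pre_arabske_na_rimske ar → Spec_arabske_na_rimske ar (arabske_na_rimske ar)

-- ===== LEMMAS AND PROOFS =====

-- the loop with accumulator c just adds c to the count obtained from accumulator 0
theorem pvVLoop_shift (c : Nat) (ar : Int) :
    pvVLoop c ar = (c + (pvVLoop 0 ar).1, (pvVLoop 0 ar).2) := by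
  by_cases h : ar > 5
  · rw [pvVLoop, if_pos h, pvVLoop_shift (c+1) (ar-5)]
    conv_rhs => rw [pvVLoop, if_pos h, pvVLoop_shift 1 (ar-5)]
    simp only [Prod.mk.injEq]
    exact ⟨by omega, trivial⟩
  · rw [pvVLoop, if_neg h]
    conv_rhs => rw [pvVLoop, if_neg h]
    simp
termination_by ar.toNat
decreasing_by all_goals omega

theorem pvDictLit :
    PySem.Dict.ofList [((1 : Int), "I"), (2, "II"), (3, "III"), (5, "V")] =
      PySem.Dict.mk [((1 : Int), "I"), (2, "II"), (3, "III"), (5, "V")] := by decide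

theorem pvMain (ar : Int) (h : Pre_arabske_na_rimske ar) :
    arabske_na_rimske ar = arabske_na_rimske_alt ar := by
  by_cases h5 : ar > 5
  · have hpre : Pre_arabske_na_rimske (ar - 5) := by
      unfold Pre_arabske_na_rimske at *; omega
    have ih := pvMain (ar - 5) hpre
    rw [show arabske_na_rimske ar
          = (arabske_na_rimske (ar - 5)).map (fun s => "V" ++ s) from by
        rw [arabske_na_rimske.eq_def]; simp only [if_pos h5], ih]
    unfold arabske_na_rimske_alt
    rw [show pvVLoop 0 ar = pvVLoop 1 (ar - 5) from by rw [pvVLoop, if_pos h5],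
        pvVLoop_shift 1 (ar - 5)]
    simp only []
    by_cases hc : (pvVLoop 0 (ar - 5)).1 = 0
    · simp only [hc, Nat.add_zero, if_neg (Nat.one_ne_zero)]
      cases (PySem.Dict.ofList [((1 : Int), "I"), (2, "II"), (3, "III"), (5, "V")]).get?
          (pvVLoop 0 (ar - 5)).2 with
      | none => rfl
      | some b => rfl
    · simp only [if_neg hc, if_neg (by omega : ¬ 1 + (pvVLoop 0 (ar - 5)).1 = 0),
        Option.map_map]
      congr 1
      funext b
      simp only [Function.comp]
      rw [show 1 + (pvVLoop 0 (ar - 5)).1 = (pvVLoop 0 (ar - 5)).1 + 1 from Nat.add_comm _ _,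
          List.replicate_succ,
          show ('V' :: List.replicate (pvVLoop 0 (ar - 5)).1 'V')
            = ['V'] ++ List.replicate (pvVLoop 0 (ar - 5)).1 'V' from rfl,
          String.ofList_append, String.append_assoc,
          show String.ofList ['V'] = "V" from by decide]
  · rw [show arabske_na_rimske ar
          = (if ar = 3 * 1 then some "III"
             else if ar = 2 * 1 then some "II"
             else if ar = 1 * 1 then some "I"
             else if ar = 5 then some "V"
             else none) from by
        rw [arabske_na_rimske.eq_def]; simp only [if_neg h5]]
    unfold arabske_na_rimske_alt
    rw [show pvVLoop 0 ar = (0, ar) from by rw [pvVLoop, if_neg h5]]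
    simp only [pvDictLit]
    split_ifs with h3 h2 h1 hV
    · subst h3; decide
    · subst h2; decide
    · subst h1; decide
    · subst hV; decide
    · simp only [PySem.Dict.get?_mk_cons, beq_iff_eq]
      split_ifs <;> first | rfl | omega
termination_by ar.toNat
decreasing_by omega

-- ===== VERDICT (by name: the statement is the Claim_ definition above) =====
theorem arabske_na_rimske_spec : Claim_equal_arabske_na_rimske := by
  intro ar _ hpre
  unfold Spec_arabske_na_rimske
  exact pvMain ar hpre
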